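-- pv_equiv track=rewrite | github.com/amirulabu/belajarpythonbot | src/utils.py | format_reply_markup
-- ===== SOURCE A (Python) =====
-- def format_reply_markup(reply_markup: list) -> list:
--     """Format reply markup for better readability on Telegram."""
--     result = []
--     last_text_is_long = False
--
--     for row in reply_markup:
--         if len(row["text"]) >= 8:
--             result.append([row])
--             last_text_is_long = True
--         else:
--             if result and isinstance(result[-1], list) and not last_text_is_long:
--                 result[-1].append(row)
--             else:
--                 result.append([row])
--             last_text_is_long = False
--
--     return result
-- ===== SOURCE B (Python) =====
-- from itertools import groupby
--
-- def format_reply_markup(reply_markup: list) -> list: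
--     """Format reply markup for better readability on Telegram."""
--     result = []
--     for is_long, group in groupby(reply_markup, key=lambda r: len(r["text"]) >= 8):
--         rows = list(group)
--         if is_long:
--             result.extend([r] for r in rows)
--         else:
--             result.append(rows)
--     return result
-- ===== Notes on version B (the rewrite author's own statement) =====
-- stated objective: idiomatic
-- what changed: Replaced A's flag-carrying loop that mutates the last result row with itertools.groupby: split the input into maximal consecutive runs by the length-class key and emit each run at once (singleton rows for long buttons, one shared row for a short run).
import Mathlib
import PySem

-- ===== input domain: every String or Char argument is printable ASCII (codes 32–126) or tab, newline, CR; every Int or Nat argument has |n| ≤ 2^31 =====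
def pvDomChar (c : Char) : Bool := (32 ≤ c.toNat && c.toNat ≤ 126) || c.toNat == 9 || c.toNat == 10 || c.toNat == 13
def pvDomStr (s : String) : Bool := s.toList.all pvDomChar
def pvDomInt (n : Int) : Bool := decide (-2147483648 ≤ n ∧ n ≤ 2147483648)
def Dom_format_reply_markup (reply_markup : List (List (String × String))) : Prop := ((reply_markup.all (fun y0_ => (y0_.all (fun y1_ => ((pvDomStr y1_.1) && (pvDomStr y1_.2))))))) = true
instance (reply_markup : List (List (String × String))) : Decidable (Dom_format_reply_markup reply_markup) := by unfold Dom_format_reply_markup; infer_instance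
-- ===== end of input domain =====

-- B replaces A's flag-carrying loop by splitting the input into maximal runs of
-- same-length-class buttons (itertools.groupby) and emitting each run at once (idiomatic).

-- ===== PORT A =====
-- len(row["text"]) >= 8; exact under Pre_ (the key "text" is present in every row)
def fmtLong (row : List (String × String)) : Bool :=
  8 ≤ PySem.Str.len ((PySem.Dict.mk row).getD "text" "")

-- result[-1].append(row): replace the last element of the (nonempty) list
def fmtAppendLast : List (List (List (String × String))) → List (String × String) → List (List (List (String × String)))
  | [], row => [[row]]
  | [last], row => [last ++ [row]]
  | x :: xs, row => x :: fmtAppendLast xs row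

-- the loop body over state (result, last_text_is_long)
def fmtStepA (st : List (List (List (String × String))) × Bool) (row : List (String × String)) :
    List (List (List (String × String))) × Bool :=
  if fmtLong row then (st.1 ++ [[row]], true)
  else if st.1 ≠ [] ∧ st.2 = false then (fmtAppendLast st.1 row, false)
  else (st.1 ++ [[row]], false)

def format_reply_markup (reply_markup : List (List (String × String))) : List (List (List (String × String))) :=
  (reply_markup.foldl fmtStepA ([], false)).1

-- ===== PORT B =====
-- itertools.groupby: maximal consecutive runs with the same key fmtLong
def fmtRuns : List (List (String × String)) → List (Bool × List (List (String × String)))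
  | [] => []
  | r :: rs =>
    let k := fmtLong r
    (k, r :: rs.takeWhile (fun x => fmtLong x == k)) ::
      fmtRuns (rs.dropWhile (fun x => fmtLong x == k))
  termination_by l => l.length
  decreasing_by simpa using Nat.lt_succ_of_le (List.length_dropWhile_le _ _)

def format_reply_markup_alt (reply_markup : List (List (String × String))) : List (List (List (String × String))) :=
  (fmtRuns reply_markup).flatMap (fun g => if g.1 then g.2.map (fun r => [r]) else [g.2])

-- ===== PRECONDITION & SPEC =====
-- Pre_ excludes exactly the inputs where some row lacks the key "text": there A raises KeyError.
def Pre_format_reply_markup (reply_markup : List (List (String × String))) : Prop :=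
  ∀ row ∈ reply_markup, ((PySem.Dict.mk row).get? "text").isSome = true
instance (reply_markup : List (List (String × String))) : Decidable (Pre_format_reply_markup reply_markup) := by unfold Pre_format_reply_markup; infer_instance

def pvWitness_format_reply_markup : (List (List (String × String))) :=
  [[("text", "short")], [("text", "a long label")], [("text", "hi")], [("text", "yo")]]

def Spec_format_reply_markup (reply_markup : List (List (String × String))) (out : List (List (List (String × String)))) : Prop := out = format_reply_markup_alt reply_markup
instance (reply_markup : List (List (String × String))) (out : List (List (List (String × String)))) : Decidable (Spec_format_reply_markup reply_markup out) := by unfold Spec_format_reply_markup; infer_instance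

-- ===== CLAIM (what is proved, stated in full; the proofs are below) =====
def Claim_equal_format_reply_markup : Prop := ∀ (reply_markup : List (List (String × String))), Dom_format_reply_markup reply_markup → Pre_format_reply_markup reply_markup → Spec_format_reply_markup reply_markup (format_reply_markup reply_markup)

-- ===== LEMMAS AND PROOFS =====

theorem fmtAppendLast_concat (l : List (List (List (String × String)))) (c : List (List (String × String)))
    (r : List (String × String)) : fmtAppendLast (l ++ [c]) r = l ++ [c ++ [r]] := by
  induction l with
  | nil => rfl
  | cons x xs ih =>
    cases xs with
    | nil => simp [fmtAppendLast]
    | cons y ys => simpa [fmtAppendLast] using ih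

-- a run of long buttons: each appends its own row and sets the flag
theorem foldA_longs (run : List (List (String × String))) (res : List (List (List (String × String)))) (b : Bool)
    (h : ∀ r ∈ run, fmtLong r = true) (hne : run ≠ []) :
    run.foldl fmtStepA (res, b) = (res ++ run.map (fun r => [r]), true) := by
  induction run generalizing res b with
  | nil => exact absurd rfl hne
  | cons r rs ih =>
    have hr : fmtLong r = true := h r (by simp)
    cases rs with
    | nil => simp [fmtStepA, hr]
    | cons y ys =>
      rw [List.foldl_cons]
      have h1 : fmtStepA (res, b) r = (res ++ [[r]], true) := by simp [fmtStepA, hr]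
      rw [h1, ih (res ++ [[r]]) true (fun x hx => h x (List.mem_cons_of_mem _ hx)) (by simp)]
      simp

-- a run of short buttons appended to the open row `cur`
theorem foldA_shorts (run : List (List (String × String))) (res : List (List (List (String × String))))
    (cur : List (List (String × String)))
    (h : ∀ r ∈ run, fmtLong r = false) :
    run.foldl fmtStepA (res ++ [cur], false) = (res ++ [cur ++ run], false) := by
  induction run generalizing cur with
  | nil => simp
  | cons r rs ih =>
    have hr : fmtLong r = false := h r (by simp)
    rw [List.foldl_cons]
    have h1 : fmtStepA (res ++ [cur], false) r = (res ++ [cur ++ [r]], false) := by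
      simp [fmtStepA, hr, fmtAppendLast_concat]
    rw [h1, ih (cur ++ [r]) (fun x hx => h x (List.mem_cons_of_mem _ hx))]
    simp

theorem foldA_eq_runs (l : List (List (String × String))) (res : List (List (List (String × String)))) (b : Bool)
    (hstart : b = true ∨ res = [] ∨ l = [] ∨ (∃ r rs, l = r :: rs ∧ fmtLong r = true)) :
    (l.foldl fmtStepA (res, b)).1
      = res ++ (fmtRuns l).flatMap (fun g => if g.1 then g.2.map (fun r => [r]) else [g.2]) := by
  induction hn : l.length using Nat.strong_induction_on generalizing l res b with
  | _ n ih =>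
  cases l with
  | nil => simp [fmtRuns]
  | cons r rs =>
    by_cases hk : fmtLong r = true
    · -- a run of long buttons
      have hall : ∀ x ∈ r :: rs.takeWhile (fun x => fmtLong x == fmtLong r), fmtLong x = true := by
        intro x hx
        rcases List.mem_cons.mp hx with h | h
        · simpa [h] using hk
        · have h2 := List.mem_takeWhile_imp h
          simpa [hk] using h2
      have hsplit : r :: rs = (r :: rs.takeWhile (fun x => fmtLong x == fmtLong r)) ++ rs.dropWhile (fun x => fmtLong x == fmtLong r) := by
        simp [List.takeWhile_append_dropWhile]
      have hrest := List.length_dropWhile_le (p := fun x => fmtLong x == fmtLong r) rs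
      set rest := rs.dropWhile (fun x => fmtLong x == fmtLong r) with hrestdef
      have step1 := foldA_longs (r :: rs.takeWhile (fun x => fmtLong x == fmtLong r)) res b
        hall (by simp)
      have hlen : rest.length ≤ rs.length := by
        rw [hrestdef]; exact List.length_dropWhile_le _ _
      have hrec := ih rest.length (by simp at hn; omega) rest
        (res ++ (r :: rs.takeWhile (fun x => fmtLong x == fmtLong r)).map (fun r => [r])) true
        (Or.inl rfl) rfl
      calc (List.foldl fmtStepA (res, b) (r :: rs)).1
          = (List.foldl fmtStepA (List.foldl fmtStepA (res, b) (r :: rs.takeWhile (fun x => fmtLong x == fmtLong r))) rest).1 := by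
            rw [← List.foldl_append, ← hsplit]
        _ = res ++ (r :: rs.takeWhile (fun x => fmtLong x == fmtLong r)).map (fun r => [r])
              ++ (fmtRuns rest).flatMap (fun g => if g.1 then g.2.map (fun r => [r]) else [g.2]) := by
            rw [step1]; rw [hrec]
        _ = _ := by
            rw [fmtRuns]; simp [hk, List.flatMap_cons, hrestdef]
    · -- a run of short buttons: first opens a fresh row (flag true or result empty)
      have hk' : fmtLong r = false := by simpa using hk
      have hall : ∀ x ∈ rs.takeWhile (fun x => fmtLong x == fmtLong r), fmtLong x = false := by
        intro x hx
        have := List.mem_takeWhile_imp hx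
        simpa [hk'] using this
      have hsplit : rs = rs.takeWhile (fun x => fmtLong x == fmtLong r) ++ rs.dropWhile (fun x => fmtLong x == fmtLong r) := by
        simp [List.takeWhile_append_dropWhile]
      set run := rs.takeWhile (fun x => fmtLong x == fmtLong r) with hrundef
      set rest := rs.dropWhile (fun x => fmtLong x == fmtLong r) with hrestdef
      -- the first step appends [[r]]
      have hfirst : fmtStepA (res, b) r = (res ++ [[r]], false) := by
        rcases hstart with hb | hres | hnil | ⟨r', rs', heq, hlong⟩
        · simp [fmtStepA, hk', hb]
        · simp [fmtStepA, hk', hres]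
        · exact absurd hnil (by simp)
        · cases heq; exact absurd hlong (by simp [hk'])
      have step2 := foldA_shorts run res [r] hall
      have hlen : rest.length ≤ rs.length := by
        rw [hrestdef]; exact List.length_dropWhile_le _ _
      have hrstlong : rest = [] ∨ (∃ x xs, rest = x :: xs ∧ fmtLong x = true) := by
        cases hct : rest with
        | nil => exact Or.inl rfl
        | cons x xs =>
          refine Or.inr ⟨x, xs, rfl, ?_⟩
          have := List.head_dropWhile_not (p := fun x => fmtLong x == fmtLong r) (l := rs) (by simp [← hrestdef, hct])
          have hx : x = (rs.dropWhile (fun x => fmtLong x == fmtLong r)).head (by simp [← hrestdef, hct]) := by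
            simp [← hrestdef, hct]
          rw [hx]
          simpa [hk'] using this
      have hrec := ih rest.length (by simp at hn; omega)
        rest (res ++ [[r] ++ run]) false
        (by rcases hrstlong with h | ⟨x, xs, hx, hl⟩
            · exact Or.inr (Or.inr (Or.inl h))
            · exact Or.inr (Or.inr (Or.inr ⟨x, xs, hx, hl⟩))) rfl
      calc (List.foldl fmtStepA (res, b) (r :: rs)).1
          = (List.foldl fmtStepA (res ++ [[r]], false) (run ++ rest)).1 := by
            rw [List.foldl_cons, hfirst, ← hsplit]
        _ = (List.foldl fmtStepA (res ++ [[r] ++ run], false) rest).1 := by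
            rw [List.foldl_append, step2]
        _ = res ++ [[r] ++ run] ++ (fmtRuns rest).flatMap (fun g => if g.1 then g.2.map (fun r => [r]) else [g.2]) := hrec
        _ = _ := by
            rw [fmtRuns]; simp [hk', List.flatMap_cons, hrestdef, hrundef]

-- ===== VERDICT (by name: the statement is the Claim_ definition above) =====
theorem format_reply_markup_spec : Claim_equal_format_reply_markup := by
  intro rm _ _
  unfold Spec_format_reply_markup format_reply_markup format_reply_markup_alt
  simpa using foldA_eq_runs rm [] false (Or.inr (Or.inl rfl))
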